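-- pv_equiv track=rewrite | github.com/ShinyueYao/ZJU_LLM_Project | perfect_code/Agent.py | code_processor
-- ===== SOURCE A (Python) =====
-- def code_processor(code):
--     lines = code.splitlines()
--     new_code =[]
--     found_import = False
--
--     for line in lines:
--         if 'import' in line:
--             found_import = True
--         if found_import:
--             if "end of the code" in line:
--                 break
--             new_code.append(line)
--     return new_code
-- ===== SOURCE B (Python) =====
-- def code_processor(code):
--     lines = code.splitlines()
--     start = next((i for i, ln in enumerate(lines) if 'import' in ln), None)
--     if start is None:
--         return []
--     end = next((j for j, ln in enumerate(lines[start:], start) if 'end of the code' in ln), None)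
--     return lines[start:end]
-- ===== Notes on version B (the rewrite author's own statement) =====
-- stated objective: alternative
-- what changed: Replaces A's single stateful pass with a found_import flag, conditional append and break by two explicit index searches (first 'import' line, then first 'end of the code' line from there) followed by one slice lines[start:end].
import Mathlib
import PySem

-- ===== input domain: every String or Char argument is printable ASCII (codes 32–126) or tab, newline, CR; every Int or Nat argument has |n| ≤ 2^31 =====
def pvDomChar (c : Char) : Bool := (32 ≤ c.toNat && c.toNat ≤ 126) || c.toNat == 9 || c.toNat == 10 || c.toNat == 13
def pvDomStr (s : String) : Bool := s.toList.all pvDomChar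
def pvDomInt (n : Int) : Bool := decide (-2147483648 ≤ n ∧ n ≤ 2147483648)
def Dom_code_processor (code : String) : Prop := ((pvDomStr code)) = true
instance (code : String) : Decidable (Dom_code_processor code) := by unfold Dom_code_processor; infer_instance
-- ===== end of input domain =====

-- B replaces A's single flagged pass by two index searches plus one slice (alternative decomposition, same cost).


-- ===== PORT A =====
-- A's loop: found_import flag, conditional append, break on the end marker.
def pvALoop (lines : List String) (found : Bool) : List String :=
  match lines with
  | [] => []
  | l :: rest =>
    let found' := found || PySem.Str.isIn "import" l
    if found' then
      if PySem.Str.isIn "end of the code" l then []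
      else l :: pvALoop rest found'
    else pvALoop rest found'

def code_processor (code : String) : List String :=
  pvALoop (PySem.Str.splitlines code) false

-- ===== PORT B =====
def code_processor_alt (code : String) : List String :=
  let lines := PySem.Str.splitlines code
  match lines.findIdx? (fun ln => PySem.Str.isIn "import" ln) with
  | none => []
  | some start =>
    match (lines.drop start).findIdx? (fun ln => PySem.Str.isIn "end of the code" ln) with
    | none => PySem.List.slice lines (some (start : Int)) none
    | some k => PySem.List.slice lines (some (start : Int)) (some ((start : Int) + (k : Int)))

-- ===== PRECONDITION & SPEC =====
def Spec_code_processor (code : String) (out : List String) : Prop := out = code_processor_alt code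
instance (code : String) (out : List String) : Decidable (Spec_code_processor code out) := by unfold Spec_code_processor; infer_instance

-- ===== CLAIM (what is proved, stated in full; the proofs are below) =====
def Claim_equal_code_processor : Prop := ∀ (code : String), Dom_code_processor code → Spec_code_processor code (code_processor code)

-- ===== LEMMAS AND PROOFS =====

-- With the flag already set, A's loop keeps lines up to the first end marker.
theorem pvALoop_true (lines : List String) :
    pvALoop lines true =
      match lines.findIdx? (fun ln => PySem.Str.isIn "end of the code" ln) with
      | none => lines
      | some k => lines.take k := by
  induction lines with
  | nil => rfl
  | cons l rest ih =>
    simp only [pvALoop, Bool.true_or, if_true, List.findIdx?_cons]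
    by_cases h : PySem.Str.isIn "end of the code" l = true
    · rw [if_pos h, if_pos h]; rfl
    · rw [if_neg h, if_neg h, ih]
      cases rest.findIdx? (fun ln => PySem.Str.isIn "end of the code" ln) with
      | none => rfl
      | some k => rfl

-- With the flag unset, A's loop skips to the first 'import' line, then runs with the flag set.
theorem pvALoop_false (lines : List String) :
    pvALoop lines false =
      match lines.findIdx? (fun ln => PySem.Str.isIn "import" ln) with
      | none => []
      | some s => pvALoop (lines.drop s) true := by
  induction lines with
  | nil => rfl
  | cons l rest ih =>
    rw [List.findIdx?_cons]
    by_cases h : PySem.Str.isIn "import" l = true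
    · have h' : PySem.Chars.isIn ['i','m','p','o','r','t'] l.toList = true := by simpa using h
      have h1 : pvALoop (l :: rest) false = pvALoop (l :: rest) true := by
        simp [pvALoop, h']
      rw [h1, if_pos h]
      rfl
    · have h' : PySem.Chars.isIn ['i','m','p','o','r','t'] l.toList = false := by
        simpa using h
      have h1 : pvALoop (l :: rest) false = pvALoop rest false := by
        simp [pvALoop, h']
      rw [h1, if_neg h, ih]
      cases rest.findIdx? (fun ln => PySem.Str.isIn "import" ln) with
      | none => rfl
      | some s => rfl

-- ===== VERDICT (by name: the statement is the Claim_ definition above) =====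
theorem code_processor_spec : Claim_equal_code_processor := by
  intro code _
  unfold Spec_code_processor code_processor
  simp only [code_processor_alt]
  rw [pvALoop_false]
  cases him : (PySem.Str.splitlines code).findIdx? (fun ln => PySem.Str.isIn "import" ln) with
  | none => rfl
  | some s =>
    simp only
    rw [pvALoop_true]
    cases hend : ((PySem.Str.splitlines code).drop s).findIdx? (fun ln => PySem.Str.isIn "end of the code" ln) with
    | none => rw [PySem.List.slice_from_natCast]
    | some k =>
      simp only
      rw [PySem.List.slice_natCast_add]
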